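-- pv_equiv track=rewrite | github.com/ahinkim/BOJ | BOJ/구현/BOJ1759.py | count
-- ===== SOURCE A (Python) =====
-- def count(s):
--   vowels = ['a', 'e', 'i', 'o', 'u']
--   vowels_cnt = 0
--   consonants_cnt = 0
--   for x in s:
--     if x in vowels:
--       vowels_cnt += 1
--     else:
--       consonants_cnt += 1
--   if vowels_cnt >= 1 and consonants_cnt >= 2:
--     return True
-- ===== SOURCE B (Python) =====
-- def count(s):
--   # Early-exit scan: walk the string decrementing the remaining requirements
--   # (1 vowel, 2 consonants) and stop as soon as both are satisfied.
--   def ok():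
--     i, nv, nc = 0, 1, 2
--     while True:
--       if nv == 0 and nc == 0:
--         return True
--       if i == len(s):
--         return False
--       if s[i] in 'aeiou':
--         nv = nv - 1 if nv else 0
--       else:
--         nc = nc - 1 if nc else 0
--       i += 1
--   if ok():
--     return True
-- ===== Notes on version B (the rewrite author's own statement) =====
-- stated objective: faster
-- what changed: B replaces A's full-pass dual-counter loop by a recursive early-exit scan that decrements the remaining requirements (1 vowel, 2 consonants) and returns as soon as both hit zero, never reading the rest of the string.
import Mathlib
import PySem

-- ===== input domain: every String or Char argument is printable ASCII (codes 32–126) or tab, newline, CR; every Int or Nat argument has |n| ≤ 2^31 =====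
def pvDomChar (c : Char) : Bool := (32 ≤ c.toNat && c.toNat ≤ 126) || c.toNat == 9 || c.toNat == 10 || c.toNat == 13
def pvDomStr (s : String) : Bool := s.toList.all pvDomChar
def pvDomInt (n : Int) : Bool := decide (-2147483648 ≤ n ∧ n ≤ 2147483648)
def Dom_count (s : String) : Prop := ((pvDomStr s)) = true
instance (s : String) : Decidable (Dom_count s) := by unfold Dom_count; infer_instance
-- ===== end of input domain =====

-- B: recursive early-exit scan decrementing the remaining requirements instead of A's full-pass dual-counter loop; same return shape (some true / none).

-- ===== PORT A =====
-- literal port: two counters updated in an if/else loop over the string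
def count (s : String) : Option Bool :=
  let vowels : List Char := ['a', 'e', 'i', 'o', 'u']
  let cnts := s.toList.foldl
    (fun (c : Int × Int) x => if x ∈ vowels then (c.1 + 1, c.2) else (c.1, c.2 + 1)) (0, 0)
  if cnts.1 ≥ 1 ∧ cnts.2 ≥ 2 then some true else none

-- ===== PORT B =====
-- helper ok(i, nv, nc): ported on the suffix of the character list (s[i:]);
-- 'nv - 1 if nv else 0' is Nat saturating subtraction nv - 1
def countOk (l : List Char) (nv nc : Nat) : Bool :=
  if nv = 0 ∧ nc = 0 then true
  else
    match l with
    | [] => false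
    | x :: rest =>
      if x ∈ "aeiou".toList then countOk rest (nv - 1) nc
      else countOk rest nv (nc - 1)

def count_alt (s : String) : Option Bool :=
  if countOk s.toList 1 2 then some true else none

-- ===== PRECONDITION & SPEC =====
def Spec_count (s : String) (out : Option Bool) : Prop := out = count_alt s
instance (s : String) (out : Option Bool) : Decidable (Spec_count s out) := by unfold Spec_count; infer_instance

-- ===== CLAIM (what is proved, stated in full; the proofs are below) =====
def Claim_equal_count : Prop := ∀ (s : String), Dom_count s → Spec_count s (count s)

-- ===== LEMMAS AND PROOFS =====

theorem count_foldl_eq (l : List Char) (a b : Int) :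
    l.foldl (fun (c : Int × Int) x =>
        if x ∈ (['a', 'e', 'i', 'o', 'u'] : List Char) then (c.1 + 1, c.2) else (c.1, c.2 + 1)) (a, b)
    = (a + ((l.filter (fun x => x ∈ (['a', 'e', 'i', 'o', 'u'] : List Char))).length : Int),
       b + (l.length : Int) - ((l.filter (fun x => x ∈ (['a', 'e', 'i', 'o', 'u'] : List Char))).length : Int)) := by
  induction l generalizing a b with
  | nil => simp
  | cons x xs ih =>
    simp only [List.foldl_cons, List.filter_cons, List.length_cons]
    by_cases hx : x ∈ (['a', 'e', 'i', 'o', 'u'] : List Char)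
    · rw [if_pos hx, ih, if_pos (by simpa using hx)]
      simp only [List.length_cons, Prod.mk.injEq]
      constructor <;> push_cast <;> ring
    · rw [if_neg hx, ih, if_neg (by simpa using hx)]
      simp only [Prod.mk.injEq]
      constructor <;> push_cast <;> ring

theorem countOk_eq (l : List Char) (nv nc : Nat) :
    countOk l nv nc
    = decide (nv ≤ (l.filter (fun x => x ∈ "aeiou".toList)).length ∧
              nc ≤ l.length - (l.filter (fun x => x ∈ "aeiou".toList)).length) := by
  induction l generalizing nv nc with
  | nil =>
    unfold countOk
    split_ifs with h <;> simp <;> omega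
  | cons x xs ih =>
    unfold countOk
    have hf : (xs.filter (fun x => x ∈ "aeiou".toList)).length ≤ xs.length :=
      List.length_filter_le _ _
    by_cases hx : x ∈ "aeiou".toList
    · simp only [List.filter_cons, hx, decide_true, if_true, List.length_cons, ih]
      split_ifs with h
      · simp; omega
      · simp only [decide_eq_decide]; omega
    · simp only [List.filter_cons, hx, decide_false, Bool.false_eq_true, if_false, List.length_cons, ih]
      split_ifs with h
      · simp; omega
      · simp only [decide_eq_decide]; omega

-- ===== VERDICT (by name: the statement is the Claim_ definition above) =====
theorem count_spec : Claim_equal_count := by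
  intro s _
  unfold Spec_count count count_alt
  have hv : ("aeiou".toList : List Char) = ['a', 'e', 'i', 'o', 'u'] := by decide
  have h := count_foldl_eq s.toList 0 0
  have hk := countOk_eq s.toList 1 2
  rw [hv] at hk
  simp only [h, hk, zero_add, decide_eq_true_iff]
  have hf : ((s.toList.filter (fun x => x ∈ (['a', 'e', 'i', 'o', 'u'] : List Char))).length) ≤ s.toList.length :=
    List.length_filter_le _ _
  split_ifs with h1 h2 h2 <;> first | rfl | (exfalso; push_cast at h1 h2 ⊢; omega)
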